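-- pv_equiv track=rewrite | github.com/Ved02ai/MedVLM-Probe | probes/base.py | extract_classification
-- ===== SOURCE A (Python) =====
-- def extract_classification(response: str) -> str:
--     """Extract classification from model response"""
--     response_lower = response.lower()
--
--     pneumonia_keywords = [
--         'pneumonia', 'infection', 'infiltrate', 'consolidation',
--         'opacity', 'abnormal', 'pathology'
--     ]
--     normal_keywords = [
--         'normal', 'healthy', 'clear', 'no abnormal',
--         'unremarkable', 'no evidence', 'negative'
--     ]
--
--     p_score = sum(1 for kw in pneumonia_keywords if kw in response_lower)
--     n_score = sum(1 for kw in normal_keywords if kw in response_lower)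
--
--     if p_score > n_score:
--         return 'pneumonia'
--     elif n_score > p_score:
--         return 'normal'
--     return 'uncertain'
-- ===== SOURCE B (Python) =====
-- def extract_classification(response: str) -> str:
--     """Extract classification from model response"""
--     pneu = ['pneumonia', 'infection', 'infiltrate', 'consolidation',
--             'opacity', 'abnormal', 'pathology']
--     norm = ['normal', 'healthy', 'clear', 'no abnormal',
--             'unremarkable', 'no evidence', 'negative']
--     text = response.lower()
--     matched = set()
--     for i in range(len(text) + 1):
--         tail = text[i:]
--         for kw in pneu + norm:
--             if tail.startswith(kw):
--                 matched.add(kw)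
--     p = sum(1 for kw in pneu if kw in matched)
--     n = sum(1 for kw in norm if kw in matched)
--     if p > n:
--         return 'pneumonia'
--     if n > p:
--         return 'normal'
--     return 'uncertain'
-- ===== Notes on version B (the rewrite author's own statement) =====
-- stated objective: alternative
-- what changed: Replaces A's per-keyword substring-membership counting with a naive multi-pattern text scan: one sweep over every position of the lowercased response collecting into a set the keywords that start there, then classifying by comparing how many collected keywords come from each class.
import Mathlib
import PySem

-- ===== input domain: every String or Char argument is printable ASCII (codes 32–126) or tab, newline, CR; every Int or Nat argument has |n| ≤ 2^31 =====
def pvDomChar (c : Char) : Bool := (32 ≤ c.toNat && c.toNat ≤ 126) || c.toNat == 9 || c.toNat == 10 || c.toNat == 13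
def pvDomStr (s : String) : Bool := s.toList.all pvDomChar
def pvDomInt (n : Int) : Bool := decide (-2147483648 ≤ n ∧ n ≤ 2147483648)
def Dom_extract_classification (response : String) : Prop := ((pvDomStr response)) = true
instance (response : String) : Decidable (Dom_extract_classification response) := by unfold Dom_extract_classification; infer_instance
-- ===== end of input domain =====

-- B replaces A's per-keyword substring-membership counts with a position-by-position
-- scan of the lowercased text collecting matched keywords into a set; objective: alternative.

-- ===== PORT A =====
def extract_classification (response : String) : String :=
  let response_lower := PySem.Str.lower response
  let pneumonia_keywords : List String :=
    ["pneumonia", "infection", "infiltrate", "consolidation",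
     "opacity", "abnormal", "pathology"]
  let normal_keywords : List String :=
    ["normal", "healthy", "clear", "no abnormal",
     "unremarkable", "no evidence", "negative"]
  let p_score : Int :=
    pneumonia_keywords.foldl
      (fun acc kw => if PySem.Str.isIn kw response_lower then acc + 1 else acc) 0
  let n_score : Int :=
    normal_keywords.foldl
      (fun acc kw => if PySem.Str.isIn kw response_lower then acc + 1 else acc) 0
  if p_score > n_score then "pneumonia"
  else if n_score > p_score then "normal"
  else "uncertain"

-- ===== PORT B =====
def extract_classification_alt (response : String) : String :=
  let pneu : List String :=
    ["pneumonia", "infection", "infiltrate", "consolidation",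
     "opacity", "abnormal", "pathology"]
  let norm : List String :=
    ["normal", "healthy", "clear", "no abnormal",
     "unremarkable", "no evidence", "negative"]
  let text : List Char := (PySem.Str.lower response).toList
  let matched : PySem.Set String :=
    (PySem.List.pyRange 0 ((text.length : Int) + 1) 1).foldl
      (fun m i =>
        let tail := PySem.List.slice text (some i) none
        (pneu ++ norm).foldl
          (fun m kw =>
            if PySem.Chars.startswith tail kw.toList then PySem.Set.add m kw else m)
          m)
      PySem.Set.empty
  let p : Int :=
    pneu.foldl (fun a kw => if PySem.Set.contains matched kw then a + 1 else a) 0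
  let n : Int :=
    norm.foldl (fun a kw => if PySem.Set.contains matched kw then a + 1 else a) 0
  if p > n then "pneumonia"
  else if n > p then "normal"
  else "uncertain"

-- ===== PRECONDITION & SPEC =====
def Spec_extract_classification (response : String) (out : String) : Prop := out = extract_classification_alt response
instance (response : String) (out : String) : Decidable (Spec_extract_classification response out) := by unfold Spec_extract_classification; infer_instance

-- ===== CLAIM =====
def Claim_equal_extract_classification : Prop := ∀ (response : String), Dom_extract_classification response → Spec_extract_classification response (extract_classification response)

-- ===== LEMMAS AND PROOFS =====

-- inner fold over the keyword list: membership in the resulting set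
theorem pvMemInner (tail : List Char) (kws : List String) (m : PySem.Set String) (x : String) :
    (x ∈ kws.foldl
        (fun m kw => if PySem.Chars.startswith tail kw.toList then PySem.Set.add m kw else m) m)
      ↔ x ∈ m ∨ (x ∈ kws ∧ PySem.Chars.startswith tail x.toList = true) := by
  induction kws generalizing m with
  | nil => simp
  | cons k ks ih =>
    simp only [List.foldl_cons]
    by_cases h : PySem.Chars.startswith tail k.toList = true
    · rw [if_pos h, ih]
      simp only [PySem.Set.mem_add, List.mem_cons]
      constructor
      · rintro ((hm | rfl) | ⟨hk, hs⟩)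
        · exact Or.inl hm
        · exact Or.inr ⟨Or.inl rfl, h⟩
        · exact Or.inr ⟨Or.inr hk, hs⟩
      · rintro (hm | ⟨(rfl | hk), hs⟩)
        · exact Or.inl (Or.inl hm)
        · exact Or.inl (Or.inr rfl)
        · exact Or.inr ⟨hk, hs⟩
    · rw [if_neg h, ih]
      simp only [List.mem_cons]
      constructor
      · rintro (hm | ⟨hk, hs⟩)
        · exact Or.inl hm
        · exact Or.inr ⟨Or.inr hk, hs⟩
      · rintro (hm | ⟨(rfl | hk), hs⟩)
        · exact Or.inl hm
        · exact absurd hs h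
        · exact Or.inr ⟨hk, hs⟩

-- outer fold over the position list: membership in the matched set
theorem pvMemOuter (text : List Char) (kws : List String) (ps : List Int)
    (m : PySem.Set String) (x : String) :
    (x ∈ ps.foldl
        (fun m i =>
          let tail := PySem.List.slice text (some i) none
          kws.foldl
            (fun m kw => if PySem.Chars.startswith tail kw.toList then PySem.Set.add m kw else m) m)
        m)
      ↔ x ∈ m ∨ (x ∈ kws ∧ ∃ i ∈ ps, PySem.Chars.startswith (PySem.List.slice text (some i) none) x.toList = true) := by
  induction ps generalizing m with
  | nil => simp
  | cons j js ih =>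
    simp only [List.foldl_cons]
    rw [ih, pvMemInner]
    simp only [List.mem_cons]
    constructor
    · rintro ((hm | ⟨hk, hs⟩) | ⟨hk, i, hi, hs⟩)
      · exact Or.inl hm
      · exact Or.inr ⟨hk, j, Or.inl rfl, hs⟩
      · exact Or.inr ⟨hk, i, Or.inr hi, hs⟩
    · rintro (hm | ⟨hk, i, (rfl | hi), hs⟩)
      · exact Or.inl (Or.inl hm)
      · exact Or.inl (Or.inr ⟨hk, hs⟩)
      · exact Or.inr ⟨hk, i, hi, hs⟩

-- B's position scan finds a keyword iff it is a substring (Python 'kw in s')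
theorem pvScanIffIsIn (text : List Char) (kw : String) :
    (∃ i ∈ PySem.List.pyRange 0 ((text.length : Int) + 1) 1,
        PySem.Chars.startswith (PySem.List.slice text (some i) none) kw.toList = true)
      ↔ PySem.Chars.isIn kw.toList text = true := by
  rw [← PySem.Chars.exists_prefix_drop_iff_isIn]
  constructor
  · rintro ⟨i, hi, hs⟩
    rw [PySem.List.mem_pyRange_one] at hi
    rw [PySem.List.slice_from text hi.1, PySem.Chars.startswith_iff] at hs
    exact ⟨i.toNat, hs⟩
  · rintro ⟨j, hj⟩
    by_cases hle : j ≤ text.length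
    · refine ⟨(j : Int), ?_, ?_⟩
      · rw [PySem.List.mem_pyRange_one]
        constructor
        · exact Int.natCast_nonneg j
        · omega
      · rw [PySem.List.slice_from text (Int.natCast_nonneg j), PySem.Chars.startswith_iff]
        simpa using hj
    · -- j past the end: the keyword is a prefix of [], so it also starts at position length
      have hnil : text.drop j = [] := List.drop_eq_nil_of_le (by omega)
      rw [hnil, List.prefix_nil] at hj
      refine ⟨(text.length : Int), ?_, ?_⟩
      · rw [PySem.List.mem_pyRange_one]
        constructor
        · exact Int.natCast_nonneg _
        · omega
      · rw [PySem.List.slice_from text (Int.natCast_nonneg _), PySem.Chars.startswith_iff]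
        simp [hj]

-- counting fold: replace the set-membership test by the equivalent substring test
theorem pvCount (rl : String) (M : PySem.Set String) (L : List String)
    (h : ∀ kw ∈ L, PySem.Set.contains M kw = PySem.Str.isIn kw rl) :
    L.foldl (fun (a : Int) kw => if PySem.Set.contains M kw then a + 1 else a) 0
      = L.foldl (fun (a : Int) kw => if PySem.Str.isIn kw rl then a + 1 else a) 0 :=
  PySem.List.foldl_congr_mem _ _ _ _ (fun acc x hx => by rw [h x hx])

theorem extract_classification_spec : Claim_equal_extract_classification := by
  intro response _
  unfold Spec_extract_classification extract_classification extract_classification_alt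
  simp only
  set M : PySem.Set String :=
    (PySem.List.pyRange 0 (((PySem.Str.lower response).toList.length : Int) + 1) 1).foldl
      (fun m i =>
        let tail := PySem.List.slice (PySem.Str.lower response).toList (some i) none
        ((["pneumonia", "infection", "infiltrate", "consolidation",
           "opacity", "abnormal", "pathology"] ++
          ["normal", "healthy", "clear", "no abnormal",
           "unremarkable", "no evidence", "negative"]).foldl
          (fun m kw =>
            if PySem.Chars.startswith tail kw.toList then PySem.Set.add m kw else m)
          m))
      PySem.Set.empty with hM
  have hc : ∀ kw : String,
      PySem.Set.contains M kw
        = (decide (kw ∈ (["pneumonia", "infection", "infiltrate", "consolidation",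
             "opacity", "abnormal", "pathology"] ++
            ["normal", "healthy", "clear", "no abnormal",
             "unremarkable", "no evidence", "negative"] : List String))
           && PySem.Str.isIn kw (PySem.Str.lower response)) := by
    intro kw
    rw [hM, Bool.eq_iff_iff, PySem.Set.contains_iff, pvMemOuter, Bool.and_eq_true,
        decide_eq_true_eq, PySem.Str.isIn_eq, PySem.Str.toList_lower]
    constructor
    · rintro (hm | ⟨hk, hs⟩)
      · exact absurd hm (by simp [PySem.Set.empty])
      · exact ⟨hk, (pvScanIffIsIn _ kw).mp hs⟩
    · rintro ⟨hk, hs⟩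
      exact Or.inr ⟨hk, (pvScanIffIsIn _ kw).mpr hs⟩
  have hP : ∀ kw ∈ (["pneumonia", "infection", "infiltrate", "consolidation",
      "opacity", "abnormal", "pathology"] : List String),
      PySem.Set.contains M kw = PySem.Str.isIn kw (PySem.Str.lower response) := by
    intro kw hk
    rw [hc kw]
    have hm : kw ∈ (["pneumonia", "infection", "infiltrate", "consolidation",
        "opacity", "abnormal", "pathology"] ++
        ["normal", "healthy", "clear", "no abnormal",
         "unremarkable", "no evidence", "negative"] : List String) :=
      List.mem_append_left _ hk
    rw [decide_eq_true hm, Bool.true_and]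
  have hN : ∀ kw ∈ (["normal", "healthy", "clear", "no abnormal",
      "unremarkable", "no evidence", "negative"] : List String),
      PySem.Set.contains M kw = PySem.Str.isIn kw (PySem.Str.lower response) := by
    intro kw hk
    rw [hc kw]
    have hm : kw ∈ (["pneumonia", "infection", "infiltrate", "consolidation",
        "opacity", "abnormal", "pathology"] ++
        ["normal", "healthy", "clear", "no abnormal",
         "unremarkable", "no evidence", "negative"] : List String) :=
      List.mem_append_right _ hk
    rw [decide_eq_true hm, Bool.true_and]
  rw [pvCount _ _ _ hP, pvCount _ _ _ hN]

-- ===== VERDICT =====
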